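-- pv_equiv track=rewrite | github.com/KyanBergeron4Runr/4Runr-AI-Lead-System | clean_and_fix_leads.py | classify_industry
-- ===== SOURCE A (Python) =====
-- def classify_industry(company):
--     """Classify industry sector."""
--     if not company:
--         return "General Business"
--
--     company_lower = company.lower()
--
--     if any(word in company_lower for word in ['tech', 'software', 'digital', 'ai']):
--         return "Technology & Software"
--     elif any(word in company_lower for word in ['consult', 'advisory']):
--         return "Consulting & Advisory"
--     elif any(word in company_lower for word in ['resources', 'mining', 'teck']):
--         return "Natural Resources"
--     elif any(word in company_lower for word in ['manufacturing', 'industrial']):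
--         return "Manufacturing & Industrial"
--     else:
--         return "Professional Services"
-- ===== SOURCE B (Python) =====
-- # Instead of trying keyword groups in order and stopping at the first hit,
-- # B collects the priority rank of EVERY matching keyword and returns the
-- # category of the best (lowest) rank, defaulting to the catch-all rank.
-- KEYWORD_PRIORITY = {
--     'tech': 0, 'software': 0, 'digital': 0, 'ai': 0,
--     'consult': 1, 'advisory': 1,
--     'resources': 2, 'mining': 2, 'teck': 2,
--     'manufacturing': 3, 'industrial': 3,
-- }
-- CATEGORIES = [
--     "Technology & Software",
--     "Consulting & Advisory",
--     "Natural Resources",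
--     "Manufacturing & Industrial",
--     "Professional Services",
-- ]
--
-- def classify_industry(company):
--     """Classify industry sector: best (lowest) priority over all matching keywords."""
--     if not company:
--         return "General Business"
--     company_lower = company.lower()
--     matched = [p for w, p in KEYWORD_PRIORITY.items() if w in company_lower]
--     return CATEGORIES[min(matched, default=4)]
-- ===== Notes on version B (the rewrite author's own statement) =====
-- stated objective: alternative
-- what changed: A short-circuits through an if/elif chain of grouped any() tests; B instead scores every keyword with a priority rank, collects the ranks of all matching keywords in one pass, and indexes the category list by the minimum rank (default rank for no match).
import Mathlib
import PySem

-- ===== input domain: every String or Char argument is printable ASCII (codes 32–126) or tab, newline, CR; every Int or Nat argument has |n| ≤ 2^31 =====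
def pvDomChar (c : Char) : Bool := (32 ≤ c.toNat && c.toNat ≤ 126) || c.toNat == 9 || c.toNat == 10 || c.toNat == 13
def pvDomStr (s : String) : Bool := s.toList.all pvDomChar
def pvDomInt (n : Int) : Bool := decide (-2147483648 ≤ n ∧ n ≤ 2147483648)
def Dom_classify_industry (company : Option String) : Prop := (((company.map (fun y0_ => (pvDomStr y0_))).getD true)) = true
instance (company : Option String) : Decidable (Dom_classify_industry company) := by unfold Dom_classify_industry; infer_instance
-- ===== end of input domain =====

-- B replaces A's prioritized if/elif chain by scoring every keyword with a rank, collecting all matching ranks, and indexing the category list by the minimum rank (alternative decomposition, same cost).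

-- ===== PORT A =====
def classify_industry (company : Option String) : String :=
  match company with
  | none => "General Business"
  | some c =>
    if c = "" then "General Business"
    else
      let company_lower := PySem.Str.lower c
      if (["tech", "software", "digital", "ai"].any fun word => PySem.Str.isIn word company_lower) then
        "Technology & Software"
      else if (["consult", "advisory"].any fun word => PySem.Str.isIn word company_lower) then
        "Consulting & Advisory"
      else if (["resources", "mining", "teck"].any fun word => PySem.Str.isIn word company_lower) then
        "Natural Resources"
      else if (["manufacturing", "industrial"].any fun word => PySem.Str.isIn word company_lower) then
        "Manufacturing & Industrial"
      else
        "Professional Services"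

-- ===== PORT B =====
def kwPriority : List (String × Nat) :=
  [("tech", 0), ("software", 0), ("digital", 0), ("ai", 0),
   ("consult", 1), ("advisory", 1),
   ("resources", 2), ("mining", 2), ("teck", 2),
   ("manufacturing", 3), ("industrial", 3)]

def categoriesB : List String :=
  ["Technology & Software", "Consulting & Advisory", "Natural Resources",
   "Manufacturing & Industrial", "Professional Services"]

def classify_industry_alt (company : Option String) : String :=
  match company with
  | none => "General Business"
  | some c =>
    if c = "" then "General Business"
    else
      let company_lower := PySem.Str.lower c
      let matched := (kwPriority.filter (fun p => PySem.Str.isIn p.1 company_lower)).map Prod.snd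
      -- CATEGORIES[min(matched, default=4)]: the index is always in range (ranks ≤ 4, 5 categories)
      categoriesB.getD ((PySem.List.min? matched (fun x => x)).getD 4) ""

-- ===== PRECONDITION & SPEC =====
def Spec_classify_industry (company : Option String) (out : String) : Prop := out = classify_industry_alt company
instance (company : Option String) (out : String) : Decidable (Spec_classify_industry company out) := by unfold Spec_classify_industry; infer_instance

-- ===== CLAIM (what is proved, stated in full; the proofs are below) =====
def Claim_equal_classify_industry : Prop := ∀ (company : Option String), Dom_classify_industry company → Spec_classify_industry company (classify_industry company)

-- ===== LEMMAS AND PROOFS =====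

-- Proof-side mirror of `(kwPriority.filter (fun p => f p.1)).map Prod.snd` with the
-- eleven membership tests abstracted into Booleans.
def ranks (b1 b2 b3 b4 b5 b6 b7 b8 b9 b10 b11 : Bool) : List Nat :=
  let t11 : List Nat := if b11 then [3] else []
  let t10 := if b10 then 3 :: t11 else t11
  let t9 := if b9 then 2 :: t10 else t10
  let t8 := if b8 then 2 :: t9 else t9
  let t7 := if b7 then 2 :: t8 else t8
  let t6 := if b6 then 1 :: t7 else t7
  let t5 := if b5 then 1 :: t6 else t6
  let t4 := if b4 then 0 :: t5 else t5
  let t3 := if b3 then 0 :: t4 else t4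
  let t2 := if b2 then 0 :: t3 else t3
  if b1 then 0 :: t2 else t2

theorem ranks_eq (f : String → Bool) :
    (kwPriority.filter (fun p => f p.1)).map Prod.snd
      = ranks (f "tech") (f "software") (f "digital") (f "ai") (f "consult") (f "advisory")
          (f "resources") (f "mining") (f "teck") (f "manufacturing") (f "industrial") := by
  simp only [kwPriority, ranks, List.filter_cons, List.filter_nil, apply_ite (List.map Prod.snd),
    List.map_cons, List.map_nil]

-- The Boolean core: A's if/elif chain agrees with B's min-rank indexing, for all
-- 2^11 combinations of the keyword-membership tests.
theorem bool_core : ∀ (b1 b2 b3 b4 b5 b6 b7 b8 b9 b10 b11 : Bool),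
    (if (b1 || (b2 || (b3 || (b4 || false)))) then "Technology & Software"
     else if (b5 || (b6 || false)) then "Consulting & Advisory"
     else if (b7 || (b8 || (b9 || false))) then "Natural Resources"
     else if (b10 || (b11 || false)) then "Manufacturing & Industrial"
     else "Professional Services")
    = categoriesB.getD
        ((PySem.List.min? (ranks b1 b2 b3 b4 b5 b6 b7 b8 b9 b10 b11) (fun x => x)).getD 4) "" := by
  decide

theorem classify_key (f : String → Bool) :
    (if (["tech", "software", "digital", "ai"].any f) then "Technology & Software"
     else if (["consult", "advisory"].any f) then "Consulting & Advisory"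
     else if (["resources", "mining", "teck"].any f) then "Natural Resources"
     else if (["manufacturing", "industrial"].any f) then "Manufacturing & Industrial"
     else "Professional Services")
    = categoriesB.getD
        ((PySem.List.min? ((kwPriority.filter (fun p => f p.1)).map Prod.snd) (fun x => x)).getD 4) "" := by
  rw [ranks_eq f]
  simp only [List.any_cons, List.any_nil]
  exact bool_core (f "tech") (f "software") (f "digital") (f "ai") (f "consult") (f "advisory")
    (f "resources") (f "mining") (f "teck") (f "manufacturing") (f "industrial")

-- ===== VERDICT (by name: the statement is the Claim_ definition above) =====
theorem classify_industry_spec : Claim_equal_classify_industry := by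
  intro company _
  cases company with
  | none => rfl
  | some c =>
    by_cases h0 : c = ""
    · simp [Spec_classify_industry, classify_industry, classify_industry_alt, h0]
    · simp only [Spec_classify_industry, classify_industry, classify_industry_alt, if_neg h0]
      exact classify_key (fun word => PySem.Str.isIn word (PySem.Str.lower c))
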